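-- pv_equiv track=rewrite | github.com/quantum-programming/stabilizer_extent | exputils/dot/recovery_state.py | make_reordering
-- ===== SOURCE A (Python) =====
-- from typing import List
--
-- def make_reordering(k: int) -> List[int]:
--     # bfs order | Amat order
--     #  c   Q    |   c   Q
--     #  8  765   |   0 345
--     #  4   32   |   1  67
--     #  1    0   |   2   8
--     # reordering = [8, 4, 1, 7, 6, 5, 3, 2, 0]
--     c_idxs = []
--     q_idxs = []
--     reorder_idx = k + k * (k + 1) // 2
--     for i in range(k)[::-1]:
--         reorder_idx -= 1
--         c_idxs.append(reorder_idx)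
--         for _ in range(i + 1):
--             reorder_idx -= 1
--             q_idxs.append(reorder_idx)
--     reordering = c_idxs + q_idxs
--     if k == 3:
--         assert reordering == [8, 4, 1, 7, 6, 5, 3, 2, 0]
--     return reordering
-- ===== SOURCE B (Python) =====
-- from typing import List
--
-- def make_reordering(k: int) -> List[int]:
--     if k < 0:
--         return []
--     # closed form: the j-th c index (for block size j) is the last slot of the
--     # first j blocks: (j) + j*(j+1)//2 - 1, taken for j = k down to 1
--     c_idxs = [j + j * (j + 1) // 2 - 1 for j in range(k, 0, -1)]
--     c_set = set(c_idxs)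
--     total = k + k * (k + 1) // 2
--     q_idxs = [x for x in range(total - 1, -1, -1) if x not in c_set]
--     return c_idxs + q_idxs
-- ===== Notes on version B (the rewrite author's own statement) =====
-- stated objective: alternative
-- what changed: B replaces A's nested block-generating loops (outer per c-index, inner per q-block) by a closed-form comprehension for the c-indices plus a single descending complement scan over all indices against a set for the q-indices.
import Mathlib
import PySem

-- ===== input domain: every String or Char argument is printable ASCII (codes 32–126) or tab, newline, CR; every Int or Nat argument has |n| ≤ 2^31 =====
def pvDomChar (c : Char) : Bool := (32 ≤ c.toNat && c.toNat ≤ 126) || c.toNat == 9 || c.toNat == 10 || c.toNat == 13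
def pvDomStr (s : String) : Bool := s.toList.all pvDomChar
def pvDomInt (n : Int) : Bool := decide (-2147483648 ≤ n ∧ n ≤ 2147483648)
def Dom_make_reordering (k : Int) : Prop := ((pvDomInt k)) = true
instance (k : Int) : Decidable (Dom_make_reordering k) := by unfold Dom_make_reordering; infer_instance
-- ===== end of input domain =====

-- B replaces A's nested block-generating loops by a closed form for the c-indices
-- plus one descending complement scan for the q-indices (objective: alternative).

-- ===== PORT A =====
-- literal port of A: nested loops mutating (c_idxs, q_idxs, reorder_idx);
-- the `assert` for k == 3 always holds in Python, so it is not modelled.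
-- body of the inner 'for _ in range(i + 1)' loop
def mrInner (st2 : List Int × Int) (_ : Int) : List Int × Int :=
  (st2.1 ++ [st2.2 - 1], st2.2 - 1)

-- body of the outer 'for i in range(k)[::-1]' loop over (c_idxs, q_idxs, reorder_idx)
def mrStep (st : List Int × List Int × Int) (i : Int) : List Int × List Int × Int :=
  let idx1 := st.2.2 - 1
  let inner := (PySem.List.pyRange 0 (i + 1) 1).foldl mrInner (st.2.1, idx1)
  (st.1 ++ [idx1], inner.1, inner.2)

def make_reordering (k : Int) : List Int :=
  let rev := (PySem.List.slice? (PySem.List.pyRange 0 k 1) none none (-1)).getD []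
  let st := rev.foldl mrStep ([], [], k + PySem.Int.floordiv (k * (k + 1)) 2)
  st.1 ++ st.2.1

-- ===== PORT B =====
def make_reordering_alt (k : Int) : List Int :=
  if k < 0 then []
  else
    let c_idxs := (PySem.List.pyRange k 0 (-1)).map
      (fun j => j + PySem.Int.floordiv (j * (j + 1)) 2 - 1)
    let c_set : PySem.Set Int := PySem.Set.ofList c_idxs
    let total := k + PySem.Int.floordiv (k * (k + 1)) 2
    let q_idxs := (PySem.List.pyRange (total - 1) (-1) (-1)).filter
      (fun x => !(PySem.Set.contains c_set x))
    c_idxs ++ q_idxs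

-- ===== PRECONDITION & SPEC =====
def Spec_make_reordering (k : Int) (out : List Int) : Prop := out = make_reordering_alt k
instance (k : Int) (out : List Int) : Decidable (Spec_make_reordering k out) := by unfold Spec_make_reordering; infer_instance

-- ===== CLAIM (what is proved, stated in full; the proofs are below) =====
def Claim_equal_make_reordering : Prop := ∀ (k : Int), Dom_make_reordering k → Spec_make_reordering k (make_reordering k)

-- ===== LEMMAS AND PROOFS =====

-- total number of indices for size n: n + n*(n+1)/2
def pvT (n : Nat) : Nat := n + n * (n + 1) / 2

-- the descending run [idx-1, idx-2, …, idx-m]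
def pvDesc (idx : Int) : Nat → List Int
  | 0 => []
  | m + 1 => (idx - 1) :: pvDesc (idx - 1) m

-- the c-list and q-list produced for size n
def pvCL : Nat → List Int
  | 0 => []
  | n + 1 => ((pvT (n + 1) : Int) - 1) :: pvCL n

def pvQL : Nat → List Int
  | 0 => []
  | n + 1 => pvDesc ((pvT (n + 1) : Int) - 1) (n + 1) ++ pvQL n

lemma pvT_succ (n : Nat) : pvT (n + 1) = pvT n + (n + 2) := by
  unfold pvT
  have h : (n + 1) * (n + 1 + 1) = n * (n + 1) + 2 * (n + 1) := by ring
  omega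

lemma pvT_mono {j n : Nat} (h : j ≤ n) : pvT j ≤ pvT n := by
  induction n with
  | zero => have : j = 0 := Nat.le_zero.mp h; simp [this]
  | succ m ih =>
    rcases Nat.lt_or_ge j (m + 1) with h' | h'
    · have := ih (by omega); rw [pvT_succ]; omega
    · have hj : j = m + 1 := by omega
      simp [hj]

lemma pvT_cast (k : Int) (n : Nat) (h : k = (n : Int)) :
    k + PySem.Int.floordiv (k * (k + 1)) 2 = (pvT n : Int) := by
  subst h
  have h1 : (n : Int) * ((n : Int) + 1) = ((n * (n + 1) : Nat) : Int) := by push_cast; ring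
  rw [h1, PySem.Int.floordiv_eq_ediv_of_pos (by omega)]
  unfold pvT
  omega

-- the inner loop: append idx-1 and decrement, once per element of l
lemma pv_inner (l : List Int) (q : List Int) (idx : Int) :
    l.foldl mrInner (q, idx) = (q ++ pvDesc idx l.length, idx - l.length) := by
  induction l generalizing q idx with
  | nil => simp [pvDesc]
  | cons a l ih =>
    rw [List.foldl_cons]
    show List.foldl mrInner (q ++ [idx - 1], idx - 1) l = _
    rw [ih]
    simp only [List.length_cons, pvDesc, Prod.mk.injEq]
    exact ⟨by simp, by push_cast; ring⟩

-- one outer step, entered with reorder_idx = pvT (m+1)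
lemma pv_step (m : Nat) (c q : List Int) :
    mrStep (c, q, (pvT (m + 1) : Int)) (m : Int)
      = (c ++ [(pvT (m + 1) : Int) - 1],
         q ++ pvDesc ((pvT (m + 1) : Int) - 1) (m + 1), (pvT m : Int)) := by
  simp only [mrStep]
  rw [pv_inner]
  have hlen : (PySem.List.pyRange 0 ((m : Int) + 1) 1).length = m + 1 := by
    rw [PySem.List.length_pyRange_one]; omega
  rw [hlen]
  have hT : (pvT (m + 1) : Int) - 1 - ((m + 1 : Nat) : Int) = (pvT m : Int) := by
    have := pvT_succ m; push_cast [this]; ring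
  simp only [Prod.mk.injEq, true_and]
  push_cast at hT ⊢
  omega

-- the outer loop of A, started at total pvT n, produces pvCL n and pvQL n
lemma pv_outer (n : Nat) (c q : List Int) :
    ((PySem.List.pyRange 0 (n : Int) 1).reverse).foldl mrStep (c, q, (pvT n : Int))
      = (c ++ pvCL n, q ++ pvQL n, 0) := by
  induction n generalizing c q with
  | zero =>
    rw [PySem.List.pyRange_one_eq_nil (by omega)]
    simp [pvCL, pvQL, pvT]
  | succ m ih =>
    have hcast : ((m + 1 : Nat) : Int) = (m : Int) + 1 := by push_cast; ring
    have hsplit : PySem.List.pyRange 0 ((m : Int) + 1) 1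
        = PySem.List.pyRange 0 (m : Int) 1 ++ [(m : Int)] :=
      PySem.List.pyRange_one_succ_right (by omega)
    rw [hcast, hsplit, List.reverse_append, List.reverse_singleton, List.singleton_append,
      List.foldl_cons, pv_step, ih]
    simp [pvCL, pvQL, List.append_assoc]

lemma pvCL_mem (n : Nat) (x : Int) :
    x ∈ pvCL n ↔ ∃ j : Nat, 1 ≤ j ∧ j ≤ n ∧ x = (pvT j : Int) - 1 := by
  induction n with
  | zero =>
    simp only [pvCL, List.not_mem_nil, false_iff, not_exists]
    rintro j ⟨h1, h2, _⟩
    omega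
  | succ m ih =>
    simp only [pvCL, List.mem_cons, ih]
    constructor
    · rintro (rfl | ⟨j, h1, h2, rfl⟩)
      · exact ⟨m + 1, by omega, by omega, rfl⟩
      · exact ⟨j, h1, by omega, rfl⟩
    · rintro ⟨j, h1, h2, rfl⟩
      rcases Nat.lt_or_ge j (m + 1) with h' | h'
      · exact Or.inr ⟨j, h1, by omega, rfl⟩
      · have hj : j = m + 1 := by omega
        subst hj
        exact Or.inl rfl

-- peel a run of m kept elements off a descending filtered range
lemma pv_peel (m : Nat) (a : Int) (p : Int → Bool)
    (hfalse : ∀ x, a - m < x → x ≤ a → p x = false) (hge : -1 ≤ a - m) :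
    (PySem.List.pyRange a (-1) (-1)).filter (fun x => !(p x))
      = pvDesc (a + 1) m ++ (PySem.List.pyRange (a - m) (-1) (-1)).filter (fun x => !(p x)) := by
  induction m generalizing a with
  | zero => simp [pvDesc]
  | succ m ih =>
    rw [PySem.List.pyRange_neg_one_cons (by push_cast at hge ⊢; omega), List.filter_cons]
    have hpa : p a = false := hfalse a (by push_cast; omega) (by omega)
    rw [hpa]
    simp only [Bool.not_false, if_pos]
    have hd : pvDesc (a + 1) (m + 1) = a :: pvDesc a m := by
      show (a + 1 - 1) :: pvDesc (a + 1 - 1) m = _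
      norm_num
    rw [hd, List.cons_append]
    congr 1
    have hih := ih (a - 1)
      (fun x hx1 hx2 => hfalse x (by push_cast at hx1 ⊢; omega) (by omega))
      (by push_cast at hge ⊢; omega)
    rw [hih]
    have hd2 : a - 1 + 1 = a := by ring
    have harg : a - 1 - (m : Int) = a - ((m + 1 : Nat) : Int) := by push_cast; ring
    rw [hd2, harg]

-- the q-list is the descending complement of the c-indices
lemma pv_qfilter (n : Nat) (p : Int → Bool)
    (hp : ∀ x : Int, 0 ≤ x → x ≤ (pvT n : Int) - 1 →
      (p x = true ↔ ∃ j : Nat, 1 ≤ j ∧ j ≤ n ∧ x = (pvT j : Int) - 1)) :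
    (PySem.List.pyRange ((pvT n : Int) - 1) (-1) (-1)).filter (fun x => !(p x)) = pvQL n := by
  induction n generalizing p with
  | zero =>
    rw [show (pvT 0 : Int) - 1 = -1 by simp [pvT],
      PySem.List.pyRange_neg_one_eq_nil (by omega)]
    simp [pvQL]
  | succ m ih =>
    have hT1 : 1 ≤ pvT (m + 1) := by unfold pvT; omega
    have hTs := pvT_succ m
    rw [PySem.List.pyRange_neg_one_cons (by omega), List.filter_cons]
    have hhead : p ((pvT (m + 1) : Int) - 1) = true := by
      rw [hp _ (by omega) (by omega)]
      exact ⟨m + 1, by omega, by omega, rfl⟩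
    rw [hhead]
    simp only [Bool.not_true, Bool.false_eq_true, if_neg, not_false_iff]
    have hpeel := pv_peel (m + 1) ((pvT (m + 1) : Int) - 1 - 1) p
      (fun x hx1 hx2 => by
        push_cast at hx1
        by_contra hne
        have hx : p x = true := by
          cases hpx : p x with
          | false => exact absurd hpx hne
          | true => rfl
        rw [hp x (by omega) (by omega)] at hx
        obtain ⟨j, hj1, hj2, rfl⟩ := hx
        rcases Nat.lt_or_ge j (m + 1) with h' | h'
        · have hmj := pvT_mono (show j ≤ m by omega)
          omega
        · have hj : j = m + 1 := by omega
          subst hj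
          omega)
      (by push_cast; omega)
    rw [hpeel]
    have harg : (pvT (m + 1) : Int) - 1 - 1 - ((m + 1 : Nat) : Int) = (pvT m : Int) - 1 := by
      push_cast [hTs]; ring
    have hdesc : (pvT (m + 1) : Int) - 1 - 1 + 1 = (pvT (m + 1) : Int) - 1 := by ring
    rw [harg, hdesc, pvQL]
    congr 1
    apply ih
    intro x hx0 hx1
    rw [hp x hx0 (by omega)]
    constructor
    · rintro ⟨j, hj1, hj2, rfl⟩
      rcases Nat.lt_or_ge j (m + 1) with h' | h'
      · exact ⟨j, hj1, by omega, rfl⟩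
      · have hj : j = m + 1 := by omega
        subst hj
        omega
    · rintro ⟨j, hj1, hj2, rfl⟩
      exact ⟨j, hj1, by omega, rfl⟩

-- B's c-list is pvCL
lemma pv_clist (n : Nat) :
    (PySem.List.pyRange (n : Int) 0 (-1)).map
      (fun j => j + PySem.Int.floordiv (j * (j + 1)) 2 - 1) = pvCL n := by
  induction n with
  | zero => simp [PySem.List.pyRange_neg_one_eq_nil, pvCL]
  | succ m ih =>
    have hcast : ((m + 1 : Nat) : Int) = (m : Int) + 1 := by push_cast; ring
    rw [hcast, PySem.List.pyRange_neg_one_cons (by omega), List.map_cons]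
    simp only [add_sub_cancel_right]
    rw [ih, show pvCL (m + 1) = ((pvT (m + 1) : Int) - 1) :: pvCL m from rfl,
      ← pvT_cast ((m : Int) + 1) (m + 1) (by omega)]

theorem make_reordering_eq (k : Int) : make_reordering k = make_reordering_alt k := by
  rcases lt_or_ge k 0 with hk | hk
  · unfold make_reordering make_reordering_alt
    rw [if_pos hk, PySem.List.pyRange_one_eq_nil (by omega)]
    simp [PySem.List.slice?_none_none_neg_one]
  · obtain ⟨n, rfl⟩ := Int.eq_ofNat_of_zero_le hk
    unfold make_reordering make_reordering_alt
    rw [if_neg (by omega)]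
    simp only [PySem.List.slice?_none_none_neg_one, Option.getD_some]
    rw [pvT_cast (n : Int) n rfl, pv_outer n [] []]
    simp only [List.nil_append]
    rw [pv_clist n]
    congr 1
    refine (pv_qfilter n _ ?_).symm
    intro x hx0 hx1
    simp only [PySem.Set.contains, List.contains_eq_mem, PySem.Set.mem_ofList, decide_eq_true_eq]
    exact pvCL_mem n x

-- ===== VERDICT (by name: the statement is the Claim_ definition above) =====
theorem make_reordering_spec : Claim_equal_make_reordering := by
  intro k _
  exact make_reordering_eq k
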